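-- pv_equiv track=rewrite | github.com/saezlab/tiedie | tiedie/util.py | map_ugraph_to_network
-- ===== SOURCE A (Python) =====
-- def map_ugraph_to_network(edge_list, network):
--     """Map undirected edges to the network to form a subnetwork
--     in the hash-key directed network format
--
--     Input:
--         edge_list: edges in (s,t) format
--         network: network in {source:set( (int, target), ... )
--
--     Returns:
--         Subnetwork in the data structure format of network input
--     """
--
--     subnetwork = {}
--
--     for s, t in edge_list:
--         # find this equivalent edge(s) in the directed network
--         # edges:
--         if s in network:
--             for i, nt in network[s]:
--                 if nt == t:
--                     if s not in subnetwork: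
--                         subnetwork[s] = set()
--                     subnetwork[s].add((i, t))
--
--         if t in network:
--             for i, nt in network[t]:
--                 if nt == s:
--                     if t not in subnetwork:
--                         subnetwork[t] = set()
--                     subnetwork[t].add((i, s))
--
--     return subnetwork
-- ===== SOURCE B (Python) =====
-- def map_ugraph_to_network(edge_list, network):
--     """Map undirected edges to the directed network, via a prebuilt
--     (source, target) -> [int, ...] index instead of rescanning network
--     values for every edge."""
--     index = {}
--     for src, entries in network.items():
--         for i, nt in entries:
--             index.setdefault((src, nt), []).append(i)
--
--     subnetwork = {}
--     for s, t in edge_list: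
--         for i in index.get((s, t), []):
--             subnetwork.setdefault(s, set()).add((i, t))
--         for i in index.get((t, s), []):
--             subnetwork.setdefault(t, set()).add((i, s))
--     return subnetwork
-- ===== Notes on version B (the rewrite author's own statement) =====
-- stated objective: alternative
-- what changed: B builds a (source,target)->[ids] index over the network once and then resolves each undirected edge by two O(1)-style lookups, instead of A's per-edge linear scan of the network's value sets.
import Mathlib
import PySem

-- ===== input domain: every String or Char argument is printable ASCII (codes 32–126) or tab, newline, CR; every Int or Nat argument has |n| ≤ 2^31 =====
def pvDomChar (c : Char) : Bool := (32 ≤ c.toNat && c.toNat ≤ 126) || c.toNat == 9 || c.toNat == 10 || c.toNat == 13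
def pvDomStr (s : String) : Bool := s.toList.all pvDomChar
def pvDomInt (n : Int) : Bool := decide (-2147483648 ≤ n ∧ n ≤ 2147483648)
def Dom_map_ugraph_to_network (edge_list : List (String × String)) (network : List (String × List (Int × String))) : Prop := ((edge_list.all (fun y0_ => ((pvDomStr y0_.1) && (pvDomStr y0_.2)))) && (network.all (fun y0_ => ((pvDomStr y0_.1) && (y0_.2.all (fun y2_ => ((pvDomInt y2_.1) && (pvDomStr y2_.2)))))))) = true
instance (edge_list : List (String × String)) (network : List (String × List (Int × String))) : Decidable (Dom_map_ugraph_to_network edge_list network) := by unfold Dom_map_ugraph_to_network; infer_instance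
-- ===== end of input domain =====

-- B builds a (source,target) -> [ids] index once so the per-edge inner scan of network values disappears; objective: alternative decomposition.

-- ===== PORT A =====
-- one (s,t)-directed half of A's loop body: scan network[key]'s entries for tgt
def pvAHalf (net : PySem.Dict String (List (Int × String))) (key tgt : String)
    (sub : PySem.Dict String (PySem.Set (Int × String))) :
    PySem.Dict String (PySem.Set (Int × String)) :=
  match net.get? key with
  | none => sub
  | some entries =>
      entries.foldl (fun sub p =>
        if p.2 == tgt then
          (if sub.contains key then sub else sub.insert key PySem.Set.empty).modify
            key PySem.Set.empty (fun st => PySem.Set.add st (p.1, tgt))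
        else sub) sub

def map_ugraph_to_network (edge_list : List (String × String)) (network : List (String × List (Int × String))) : List (String × List (Int × String)) :=
  let net := PySem.Dict.mk network
  (edge_list.foldl (fun sub e =>
      pvAHalf net e.2 e.1 (pvAHalf net e.1 e.2 sub))
    PySem.Dict.empty).items

-- ===== PORT B =====
-- for key `key`, add each id of `ids` as (id, other) to subnetwork[key] (created empty if absent)
def pvBHalf (ids : List Int) (key other : String)
    (sub : PySem.Dict String (PySem.Set (Int × String))) :
    PySem.Dict String (PySem.Set (Int × String)) :=
  ids.foldl (fun sub i =>
    (sub.setdefault key PySem.Set.empty).modify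
      key PySem.Set.empty (fun st => PySem.Set.add st (i, other))) sub

def map_ugraph_to_network_alt (edge_list : List (String × String)) (network : List (String × List (Int × String))) : List (String × List (Int × String)) :=
  -- network.items() of the input dict is its pair list
  let index : PySem.Dict (String × String) (List Int) :=
    network.foldl (fun idx p =>
      p.2.foldl (fun idx q => idx.modify (p.1, q.2) [] (fun l => l ++ [q.1])) idx)
      PySem.Dict.empty
  (edge_list.foldl (fun sub e =>
      pvBHalf (index.getD (e.2, e.1) []) e.2 e.1
        (pvBHalf (index.getD (e.1, e.2) []) e.1 e.2 sub))
    PySem.Dict.empty).items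

-- ===== PRECONDITION & SPEC =====
-- Pre_ excludes association lists with duplicate source keys, which cannot arise from a
-- Python dict (A reads only the first binding, B's index aggregates all of them).
def Pre_map_ugraph_to_network (edge_list : List (String × String)) (network : List (String × List (Int × String))) : Prop :=
  (network.map Prod.fst).Nodup
instance (edge_list : List (String × String)) (network : List (String × List (Int × String))) : Decidable (Pre_map_ugraph_to_network edge_list network) := by unfold Pre_map_ugraph_to_network; infer_instance

def pvWitness_map_ugraph_to_network : (List (String × String)) × (List (String × List (Int × String))) :=
  ([("a", "b"), ("b", "c")], [("a", [(1, "b"), (2, "c")]), ("c", [(3, "b")])])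

def Spec_map_ugraph_to_network (edge_list : List (String × String)) (network : List (String × List (Int × String))) (out : List (String × List (Int × String))) : Prop := out = map_ugraph_to_network_alt edge_list network
instance (edge_list : List (String × String)) (network : List (String × List (Int × String))) (out : List (String × List (Int × String))) : Decidable (Spec_map_ugraph_to_network edge_list network out) := by unfold Spec_map_ugraph_to_network; infer_instance

-- ===== CLAIM (what is proved, stated in full; the proofs are below) =====
def Claim_equal_map_ugraph_to_network : Prop := ∀ (edge_list : List (String × String)) (network : List (String × List (Int × String))), Dom_map_ugraph_to_network edge_list network → Pre_map_ugraph_to_network edge_list network → Spec_map_ugraph_to_network edge_list network (map_ugraph_to_network edge_list network)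

-- ===== LEMMAS AND PROOFS =====

-- the double index-building fold is the flat fold over all ((source,target),id) triples
theorem pvIndexFlat (network : List (String × List (Int × String)))
    (idx : PySem.Dict (String × String) (List Int)) :
    network.foldl (fun idx p =>
        p.2.foldl (fun idx q => idx.modify (p.1, q.2) [] (fun l => l ++ [q.1])) idx) idx
    = (network.flatMap (fun p => p.2.map (fun q => ((p.1, q.2), q.1)))).foldl
        (fun d x => d.modify x.1 [] (fun l => l ++ [x.2])) idx := by
  induction network generalizing idx with
  | nil => rfl
  | cons p rest ih =>
      simp only [List.foldl_cons, List.flatMap_cons, List.foldl_append, List.foldl_map]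
      exact ih _

-- filtering the flat triple list at (key,tgt) recovers A's scan of network[key]
theorem pvFlatFilter (network : List (String × List (Int × String)))
    (hnd : (network.map Prod.fst).Nodup) (key tgt : String) :
    ((network.flatMap (fun p => p.2.map (fun q => ((p.1, q.2), q.1)))).filter
        (fun x => x.1 == (key, tgt))).map (fun x => x.2)
    = match (PySem.Dict.mk network).get? key with
      | none => []
      | some entries => ((entries.filter (fun q => q.2 == tgt)).map Prod.fst) := by
  induction network with
  | nil => rfl
  | cons p rest ih =>
      obtain ⟨a, es⟩ := p
      simp only [List.map_cons, List.nodup_cons] at hnd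
      obtain ⟨hnotin, hndrest⟩ := hnd
      simp only [List.flatMap_cons, List.filter_append, List.map_append, List.filter_map,
        PySem.Dict.get?_mk_cons]
      by_cases hak : a = key
      · have hrest : (rest.flatMap (fun p => p.2.map (fun q => ((p.1, q.2), q.1)))).filter
            (fun x => x.1 == (key, tgt)) = [] := by
          rw [List.filter_eq_nil_iff]
          intro x hx
          obtain ⟨r, hr, hxr⟩ := List.mem_flatMap.mp hx
          obtain ⟨q, _, hq⟩ := List.mem_map.mp hxr
          simp only [beq_iff_eq]
          intro hcon
          have h1 : x.1.1 = r.1 := by rw [← hq]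
          have h2 : x.1.1 = key := by rw [hcon]
          have h3 : r.1 = key := by rw [← h1, h2]
          exact hnotin (by rw [hak, ← h3]; exact List.mem_map.mpr ⟨r, hr, rfl⟩)
        rw [hrest]
        have hfc : ∀ q ∈ es, (((fun x => x.1 == (key, tgt)) ∘ fun q => ((a, q.2), q.1)) q)
            = (q.2 == tgt) := by
          intro q _
          simp [Function.comp, Prod.ext_iff, hak]
        rw [List.filter_congr hfc]
        simp [hak, List.map_map, Function.comp]
      · have hes : es.filter ((fun x => x.1 == (key, tgt)) ∘ fun q => ((a, q.2), q.1)) = [] := by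
          rw [List.filter_eq_nil_iff]
          intro q _
          simp [Function.comp, Prod.ext_iff, hak]
        rw [hes]
        have hbk : (a == key) = false := by simpa using hak
        simp only [hbk, Bool.false_eq_true, if_false, List.map_nil, List.nil_append]
        exact ih hndrest

-- the index lookup returns exactly the ids of network[key]'s entries whose target is tgt
theorem pvIndex_getD (network : List (String × List (Int × String)))
    (hnd : (network.map Prod.fst).Nodup) (key tgt : String) :
    (network.foldl (fun idx p =>
        p.2.foldl (fun idx q => idx.modify (p.1, q.2) [] (fun l => l ++ [q.1])) idx)
      PySem.Dict.empty).getD (key, tgt) []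
    = match (PySem.Dict.mk network).get? key with
      | none => []
      | some entries => ((entries.filter (fun q => q.2 == tgt)).map Prod.fst) := by
  rw [pvIndexFlat, PySem.Dict.getD_foldl_modify_append, PySem.Dict.getD_empty]
  simpa using pvFlatFilter network hnd key tgt

-- A's conditional create-if-absent is Python's dict.setdefault
theorem pvContains_ite_eq_setdefault (d : PySem.Dict String (PySem.Set (Int × String))) (key : String) :
    (if d.contains key then d else d.insert key PySem.Set.empty) = d.setdefault key PySem.Set.empty := by
  by_cases h : d.contains key
  · rw [if_pos h, PySem.Dict.setdefault_of_contains _ _ h]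
  · rw [if_neg h, PySem.Dict.setdefault_of_not_contains _ _ (by simpa using h)]

-- A's filtered fold over entries is B's fold over the filtered-and-projected id list
theorem pvFoldFilter (key tgt : String) (entries : List (Int × String))
    (sub : PySem.Dict String (PySem.Set (Int × String))) :
    entries.foldl (fun sub p =>
        if p.2 == tgt then
          (if sub.contains key then sub else sub.insert key PySem.Set.empty).modify
            key PySem.Set.empty (fun st => PySem.Set.add st (p.1, tgt))
        else sub) sub
    = ((entries.filter (fun q => q.2 == tgt)).map Prod.fst).foldl (fun sub i =>
        (sub.setdefault key PySem.Set.empty).modify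
          key PySem.Set.empty (fun st => PySem.Set.add st (i, tgt))) sub := by
  induction entries generalizing sub with
  | nil => rfl
  | cons p rest ih =>
      by_cases hpt : p.2 = tgt
      · simp only [List.foldl_cons, List.filter_cons, hpt, BEq.rfl, if_true, List.map_cons]
        rw [pvContains_ite_eq_setdefault]
        exact ih _
      · have hb : (p.2 == tgt) = false := by simpa using hpt
        simp only [List.foldl_cons, List.filter_cons, hb, if_false, Bool.false_eq_true]
        exact ih _

-- A's half-loop equals B's half-loop on the matching id list
theorem pvHalf_eq (net : PySem.Dict String (List (Int × String))) (key tgt : String)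
    (sub : PySem.Dict String (PySem.Set (Int × String))) :
    pvAHalf net key tgt sub
    = pvBHalf (match net.get? key with
               | none => []
               | some entries => ((entries.filter (fun q => q.2 == tgt)).map Prod.fst))
        key tgt sub := by
  unfold pvAHalf pvBHalf
  cases h : net.get? key with
  | none => rfl
  | some entries => exact pvFoldFilter key tgt entries sub

-- ===== VERDICT (by name: the statement is the Claim_ definition above) =====
theorem map_ugraph_to_network_spec : Claim_equal_map_ugraph_to_network := by
  intro edge_list network _ hpre
  unfold Spec_map_ugraph_to_network map_ugraph_to_network map_ugraph_to_network_alt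
  show (edge_list.foldl (fun sub e =>
          pvAHalf (PySem.Dict.mk network) e.2 e.1 (pvAHalf (PySem.Dict.mk network) e.1 e.2 sub))
        PySem.Dict.empty).items
      = (edge_list.foldl (fun sub e =>
          pvBHalf ((network.foldl (fun idx p =>
              p.2.foldl (fun idx q => idx.modify (p.1, q.2) [] (fun l => l ++ [q.1])) idx)
            PySem.Dict.empty).getD (e.2, e.1) []) e.2 e.1
            (pvBHalf ((network.foldl (fun idx p =>
                p.2.foldl (fun idx q => idx.modify (p.1, q.2) [] (fun l => l ++ [q.1])) idx)
              PySem.Dict.empty).getD (e.1, e.2) []) e.1 e.2 sub))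
        PySem.Dict.empty).items
  have hstep : (fun (sub : PySem.Dict String (PySem.Set (Int × String))) (e : String × String) =>
        pvAHalf (PySem.Dict.mk network) e.2 e.1 (pvAHalf (PySem.Dict.mk network) e.1 e.2 sub))
      = (fun sub e =>
        pvBHalf ((network.foldl (fun idx p =>
            p.2.foldl (fun idx q => idx.modify (p.1, q.2) [] (fun l => l ++ [q.1])) idx)
          PySem.Dict.empty).getD (e.2, e.1) []) e.2 e.1
          (pvBHalf ((network.foldl (fun idx p =>
              p.2.foldl (fun idx q => idx.modify (p.1, q.2) [] (fun l => l ++ [q.1])) idx)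
            PySem.Dict.empty).getD (e.1, e.2) []) e.1 e.2 sub)) := by
    funext sub e
    rw [pvHalf_eq, pvHalf_eq, pvIndex_getD network hpre, pvIndex_getD network hpre]
  rw [hstep]
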